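-- pv_equiv track=rewrite | github.com/algogazaa/algogazaa | 구현/NC-1번/221017_박지연.py | solution
-- ===== SOURCE A (Python) =====
-- def solution(source):
--     answer = ''
--
--     while True:
--         result = []
--         dest = []
--         for i in source:
--             if i not in result:
--                 result.append(i)
--             else:
--                 dest.append(i)
--         result.sort()
--         for j in result:
--             answer += j
--
--         if len(dest) == 0:
--             break
--         else:
--             source = ''.join(dest)
--
--     return answer
-- ===== SOURCE B (Python) =====
-- def solution(source):
--     counts = {}
--     for ch in source:
--         counts[ch] = counts.get(ch, 0) + 1
--     order = sorted(counts)
--     maxc = max(counts.values(), default=0)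
--     out = []
--     for level in range(1, maxc + 1):
--         for ch in order:
--             if counts.get(ch, 0) >= level:
--                 out.append(ch)
--     return ''.join(out)
-- ===== Notes on version B (the rewrite author's own statement) =====
-- stated objective: faster
-- what changed: A repeatedly dedups the remaining string and rescans the leftovers pass after pass (linear membership test inside each pass); B counts character frequencies once in a dict and then emits the sorted distinct characters for each frequency level 1..max.
import Mathlib
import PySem

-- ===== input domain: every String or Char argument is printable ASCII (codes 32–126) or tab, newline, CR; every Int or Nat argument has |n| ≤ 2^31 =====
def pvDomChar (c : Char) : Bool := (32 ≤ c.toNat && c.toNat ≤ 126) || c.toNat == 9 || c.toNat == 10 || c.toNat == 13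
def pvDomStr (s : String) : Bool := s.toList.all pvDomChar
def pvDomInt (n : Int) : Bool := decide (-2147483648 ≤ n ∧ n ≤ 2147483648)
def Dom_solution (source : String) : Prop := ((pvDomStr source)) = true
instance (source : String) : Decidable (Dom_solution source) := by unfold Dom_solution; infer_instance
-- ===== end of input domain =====

-- B replaces A's repeated dedup-and-rescan passes over the shrinking string by a single
-- frequency count followed by per-level emission of the sorted distinct characters.

-- ===== PORT A =====
-- the body of A's `for i in source` loop (result, dest accumulator pair)
def passStep (acc : List Char × List Char) (i : Char) : List Char × List Char :=
  if i ∉ acc.1 then (acc.1 ++ [i], acc.2) else (acc.1, acc.2 ++ [i])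

-- one full pass of A's inner for-loop over the current source
def solutionPass (src : List Char) : List Char × List Char := src.foldl passStep ([], [])

-- (the lemmas up to `solutionPass_snd_length_lt` are needed by `decreasing_by` of the loop port)
lemma passStep_mem (acc : List Char × List Char) (i : Char) (h : i ∈ acc.1) :
    passStep acc i = (acc.1, acc.2 ++ [i]) := by simp [passStep, h]

lemma passStep_notmem (acc : List Char × List Char) (i : Char) (h : i ∉ acc.1) :
    passStep acc i = (acc.1 ++ [i], acc.2) := by simp [passStep, h]

lemma pass_fst (src : List Char) : ∀ (res dest : List Char),
    (src.foldl passStep (res, dest)).1 = PySem.Set.update res src := by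
  induction src with
  | nil => intro res dest; simp [PySem.Set.update_nil]
  | cons x t ih =>
    intro res dest
    rw [List.foldl_cons, PySem.Set.update_cons]
    by_cases hx : x ∈ res
    · rw [passStep_mem _ _ hx, ih, PySem.Set.add_of_mem hx]
    · rw [passStep_notmem _ _ hx, ih, PySem.Set.add_of_not_mem hx]

lemma pass_length (src : List Char) : ∀ (res dest : List Char),
    (src.foldl passStep (res, dest)).1.length + (src.foldl passStep (res, dest)).2.length
      = res.length + dest.length + src.length := by
  induction src with
  | nil => intro res dest; simp
  | cons x t ih =>
    intro res dest
    rw [List.foldl_cons]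
    by_cases hx : x ∈ res
    · rw [passStep_mem _ _ hx, ih]; simp; omega
    · rw [passStep_notmem _ _ hx, ih]; simp; omega

lemma solutionPass_fst (src : List Char) : (solutionPass src).1 = PySem.Set.ofList src := by
  rw [solutionPass, pass_fst, PySem.Set.update_nil_left]

lemma solutionPass_snd_length_lt (src : List Char) (h : (solutionPass src).2.length ≠ 0) :
    (solutionPass src).2.length < src.length := by
  have hl : (solutionPass src).1.length + (solutionPass src).2.length = src.length := by
    have h := pass_length src [] []
    simp only [List.length_nil, Nat.zero_add] at h
    exact h
  rcases src with _ | ⟨y, t⟩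
  · simp [solutionPass] at h
  · have hy : y ∈ (solutionPass (y :: t)).1 := by
      rw [solutionPass_fst]
      exact (PySem.Set.mem_ofList _ _).mpr List.mem_cons_self
    have h1 : 1 ≤ (solutionPass (y :: t)).1.length := List.length_pos_of_mem hy
    simp only [List.length_cons] at hl ⊢
    omega

-- A's `while True` loop; `answer` is the accumulated output as a char list.
def solutionLoop (src : List Char) (answer : List Char) : List Char :=
  let p := solutionPass src
  let answer2 := answer ++ PySem.List.sorted p.1 (fun x => x)
  if _h : p.2.length = 0 then answer2
  else solutionLoop p.2 answer2
termination_by src.length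
decreasing_by exact solutionPass_snd_length_lt src _h

def solution (source : String) : String :=
  String.ofList (solutionLoop source.toList [])

-- ===== PORT B =====
def solution_alt (source : String) : String :=
  let counts := source.toList.foldl (fun d ch => d.insert ch (d.getD ch 0 + 1)) PySem.Dict.empty
  let order := PySem.List.sorted counts.keys (fun x => x)
  let maxc := PySem.List.maxD counts.values (fun x => x) 0
  let out := (PySem.List.pyRange 1 (maxc + 1)).foldl (fun acc level =>
      order.foldl (fun acc2 ch => if level ≤ counts.getD ch 0 then acc2 ++ [ch] else acc2) acc) []
  String.ofList out

-- ===== PRECONDITION & SPEC =====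
def Spec_solution (source : String) (out : String) : Prop := out = solution_alt source
instance (source : String) (out : String) : Decidable (Spec_solution source out) := by unfold Spec_solution; infer_instance

-- ===== CLAIM (what is proved, stated in full; the proofs are below) =====
def Claim_equal_solution : Prop := ∀ (source : String), Dom_solution source → Spec_solution source (solution source)

-- ===== LEMMAS AND PROOFS =====

-- the sorted distinct characters of cs
def sset (cs : List Char) : List Char := PySem.List.sorted (PySem.Set.ofList cs) (fun x => x)

-- the maximal multiplicity of a character in cs (0 for empty)
def mcount (cs : List Char) : Int :=
  PySem.List.maxD ((PySem.Set.ofList cs).map (fun c => (cs.count c : Int))) (fun x => x) 0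

-- canonical form of B's output
def bspec (cs : List Char) : List Char :=
  (PySem.List.pyRange 1 (mcount cs + 1)).flatMap
    (fun k => (sset cs).filter (fun c => decide (k ≤ (cs.count c : Int))))

lemma pass_count (src : List Char) : ∀ (res dest : List Char) (c : Char),
    (src.foldl passStep (res, dest)).1.count c + (src.foldl passStep (res, dest)).2.count c
      = res.count c + dest.count c + src.count c := by
  induction src with
  | nil => intro res dest c; simp
  | cons x t ih =>
    intro res dest c
    rw [List.foldl_cons, List.count_cons]
    by_cases hx : x ∈ res
    · rw [passStep_mem _ _ hx, ih]
      simp [List.count_append, List.count_cons]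
      by_cases hc : x = c
      · rw [if_pos hc]; omega
      · rw [if_neg hc]; omega
    · rw [passStep_notmem _ _ hx, ih]
      simp [List.count_append, List.count_cons]
      by_cases hc : x = c
      · rw [if_pos hc]; omega
      · rw [if_neg hc]; omega

lemma solutionPass_count (src : List Char) (c : Char) (h : c ∈ src) :
    (solutionPass src).2.count c + 1 = src.count c := by
  have hp := pass_count src [] [] c
  simp only [List.count_nil, Nat.zero_add] at hp
  have hfst : (src.foldl passStep ([], [])).1.count c = 1 := by
    show (solutionPass src).1.count c = 1
    rw [solutionPass_fst]
    exact List.count_eq_one_of_mem (PySem.Set.nodup_ofList src) ((PySem.Set.mem_ofList _ _).mpr h)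
  have hsnd : (solutionPass src).2.count c = (src.foldl passStep ([], [])).2.count c := rfl
  omega

lemma solutionPass_count_notmem (src : List Char) (c : Char) (h : c ∉ src) :
    (solutionPass src).2.count c = 0 := by
  have hp := pass_count src [] [] c
  simp only [List.count_nil, Nat.zero_add] at hp
  have h0 : src.count c = 0 := List.count_eq_zero.mpr h
  have : (solutionPass src).2.count c = (src.foldl passStep ([], [])).2.count c := rfl
  omega

lemma mem_dest_iff (src : List Char) (c : Char) :
    c ∈ (solutionPass src).2 ↔ 2 ≤ src.count c := by
  constructor
  · intro hc
    by_cases hm : c ∈ src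
    · have := solutionPass_count src c hm
      have hpos : 0 < (solutionPass src).2.count c := List.count_pos_iff.mpr hc
      omega
    · have := solutionPass_count_notmem src c hm
      have hpos : 0 < (solutionPass src).2.count c := List.count_pos_iff.mpr hc
      omega
  · intro h2
    have hm : c ∈ src := by
      by_contra hn
      have := List.count_eq_zero.mpr hn
      omega
    have := solutionPass_count src c hm
    exact List.count_pos_iff.mp (by omega)

lemma count_le_mcount (cs : List Char) (c : Char) (h : c ∈ cs) :
    (cs.count c : Int) ≤ mcount cs := by
  have hmem : ((cs.count c : Int)) ∈ (PySem.Set.ofList cs).map (fun c => (cs.count c : Int)) :=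
    List.mem_map.mpr ⟨c, (PySem.Set.mem_ofList _ _).mpr h, rfl⟩
  rcases hx : (PySem.Set.ofList cs).map (fun c => (cs.count c : Int)) with _ | ⟨y, t⟩
  · rw [hx] at hmem; simp at hmem
  · rw [hx] at hmem
    rw [mcount, hx, PySem.List.maxD_id_cons]
    rcases List.mem_cons.mp hmem with h1 | h1
    · subst h1; exact (PySem.List.le_foldl_max t _).1
    · exact (PySem.List.le_foldl_max t _).2 _ h1

lemma mcount_mem (cs : List Char) (h : cs ≠ []) :
    ∃ c, c ∈ cs ∧ mcount cs = (cs.count c : Int) := by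
  have hne : (PySem.Set.ofList cs).map (fun c => (cs.count c : Int)) ≠ [] := by
    rcases cs with _ | ⟨y, t⟩
    · exact absurd rfl h
    · intro hh
      have : y ∈ PySem.Set.ofList (y :: t) := (PySem.Set.mem_ofList _ _).mpr List.mem_cons_self
      have hmm : ((((y :: t).count y : Nat)) : Int)
          ∈ (PySem.Set.ofList (y :: t)).map (fun c => (((y :: t).count c : Nat) : Int)) :=
        List.mem_map.mpr ⟨y, this, rfl⟩
      rw [hh] at hmm; simp at hmm
  have := PySem.List.maxD_mem _ (fun x : Int => x) 0 hne
  rw [← mcount] at this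
  rcases List.mem_map.mp this with ⟨c, hc, heq⟩
  exact ⟨c, (PySem.Set.mem_ofList _ _).mp hc, heq.symm⟩

lemma strict_sorted_ext (l₁ l₂ : List Char)
    (h₁ : l₁.Pairwise (· < ·)) (h₂ : l₂.Pairwise (· < ·))
    (hm : ∀ x, x ∈ l₁ ↔ x ∈ l₂) : l₁ = l₂ := by
  have hp : l₁.Perm l₂ :=
    (List.perm_ext_iff_of_nodup h₁.nodup h₂.nodup).mpr hm
  exact List.Perm.eq_of_pairwise (fun a b _ _ hab hba => le_antisymm hab hba)
    (h₁.imp le_of_lt) (h₂.imp le_of_lt) hp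

lemma mem_sset (cs : List Char) (c : Char) : c ∈ sset cs ↔ c ∈ cs := by
  rw [sset, PySem.List.mem_sorted, PySem.Set.mem_ofList]

lemma sset_pairwise (cs : List Char) : (sset cs).Pairwise (· < ·) :=
  PySem.List.sorted_ofList_pairwise_lt cs

lemma block_step (cs : List Char) (k : Int) (hk : 1 ≤ k) :
    (sset cs).filter (fun c => decide (k + 1 ≤ (cs.count c : Int)))
      = (sset (solutionPass cs).2).filter (fun c => decide (k ≤ ((solutionPass cs).2.count c : Int))) := by
  apply strict_sorted_ext
  · exact (sset_pairwise cs).filter _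
  · exact (sset_pairwise _).filter _
  · intro x
    simp only [List.mem_filter, mem_sset, decide_eq_true_eq]
    constructor
    · rintro ⟨hx, hc⟩
      have := solutionPass_count cs x hx
      have hd : x ∈ (solutionPass cs).2 := (mem_dest_iff cs x).mpr (by omega)
      exact ⟨hd, by omega⟩
    · rintro ⟨hd, hc⟩
      have h2 : 2 ≤ cs.count x := (mem_dest_iff cs x).mp hd
      have hx : x ∈ cs := List.count_pos_iff.mp (by omega)
      have := solutionPass_count cs x hx
      exact ⟨hx, by omega⟩

lemma mcount_step (cs : List Char) (h : (solutionPass cs).2 ≠ []) :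
    mcount cs = mcount (solutionPass cs).2 + 1 := by
  have hcs : cs ≠ [] := by
    intro hn; subst hn; exact h rfl
  obtain ⟨c0, hc0, he0⟩ := mcount_mem cs hcs
  obtain ⟨d0, hd0, hd0e⟩ := mcount_mem _ h
  have hd2 : 2 ≤ cs.count d0 := (mem_dest_iff cs d0).mp hd0
  have hd0cs : d0 ∈ cs := List.count_pos_iff.mp (by omega)
  have hcnt_d0 := solutionPass_count cs d0 hd0cs
  have hge : mcount (solutionPass cs).2 + 1 ≤ mcount cs := by
    have := count_le_mcount cs d0 hd0cs
    omega
  have hle : mcount cs ≤ mcount (solutionPass cs).2 + 1 := by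
    by_cases h2 : 2 ≤ cs.count c0
    · have hmem : c0 ∈ (solutionPass cs).2 := (mem_dest_iff cs c0).mpr h2
      have hcnt := solutionPass_count cs c0 hc0
      have := count_le_mcount (solutionPass cs).2 c0 hmem
      omega
    · have := count_le_mcount cs d0 hd0cs
      omega
  omega

lemma bspec_nil : bspec [] = [] := by
  simp [bspec, mcount, PySem.Set.ofList_nil, PySem.List.maxD_nil]

lemma block_one (cs : List Char) :
    (sset cs).filter (fun c => decide ((1:Int) ≤ (cs.count c : Int))) = sset cs := by
  rw [List.filter_eq_self]
  intro a ha
  have : a ∈ cs := (mem_sset cs a).mp ha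
  have h1 : 1 ≤ cs.count a := List.count_pos_iff.mpr this
  simp; omega

lemma bspec_last (cs : List Char) (h : (solutionPass cs).2 = []) :
    bspec cs = sset cs := by
  rcases eq_or_ne cs [] with hn | hn
  · subst hn
    rw [bspec_nil]
    simp [sset, PySem.Set.ofList_nil, PySem.List.sorted]
  · have hm1 : mcount cs = 1 := by
      obtain ⟨c0, hc0, he0⟩ := mcount_mem cs hn
      have hge : 1 ≤ cs.count c0 := List.count_pos_iff.mpr hc0
      have hle : cs.count c0 ≤ 1 := by
        by_contra hgt
        have : c0 ∈ (solutionPass cs).2 := (mem_dest_iff cs c0).mpr (by omega)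
        rw [h] at this; simp at this
      omega
    rw [bspec, hm1]
    rw [PySem.List.pyRange_one_cons (by omega : (1:Int) < 1 + 1),
        PySem.List.pyRange_one_eq_nil (by omega : (1:Int) + 1 ≤ 1 + 1)]
    simp only [List.flatMap_cons, List.flatMap_nil, List.append_nil]
    exact block_one cs

lemma bspec_step (cs : List Char) (h : (solutionPass cs).2 ≠ []) :
    bspec cs = sset cs ++ bspec (solutionPass cs).2 := by
  have hm1 : 1 ≤ mcount (solutionPass cs).2 := by
    obtain ⟨d0, hd0, he0⟩ := mcount_mem _ h
    have : 1 ≤ (solutionPass cs).2.count d0 := List.count_pos_iff.mpr hd0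
    omega
  rw [bspec, mcount_step cs h]
  rw [PySem.List.pyRange_one_cons (by omega)]
  rw [List.flatMap_cons, block_one cs]
  congr 1
  rw [bspec]
  rw [PySem.List.pyRange_one (1+1), PySem.List.pyRange_one 1]
  have e1 : (mcount (solutionPass cs).2 + 1 + 1 - (1 + 1)) = mcount (solutionPass cs).2 := by ring
  have e2 : (mcount (solutionPass cs).2 + 1 - 1) = mcount (solutionPass cs).2 := by ring
  rw [e1, e2, List.flatMap_map, List.flatMap_map]
  apply List.flatMap_congr
  intro j _
  have hb := block_step cs (1 + (j:Int)) (by omega)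
  have h2 : (1:Int) + 1 + (j:Int) = 1 + (j:Int) + 1 := by ring
  rw [h2, hb]

lemma loop_eq (n : Nat) : ∀ cs : List Char, cs.length ≤ n → ∀ ans : List Char,
    solutionLoop cs ans = ans ++ bspec cs := by
  induction n with
  | zero =>
    intro cs hl ans
    have hnil : cs = [] := List.length_eq_zero_iff.mp (Nat.le_zero.mp hl)
    subst hnil
    rw [solutionLoop]
    have hd : (solutionPass ([] : List Char)).2.length = 0 := rfl
    simp only [hd, dif_pos]
    rw [bspec_nil, solutionPass_fst]
    simp [PySem.Set.ofList_nil, PySem.List.sorted]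
  | succ n ih =>
    intro cs hl ans
    rw [solutionLoop]
    by_cases hd : (solutionPass cs).2.length = 0
    · simp only [hd, dif_pos]
      rw [bspec_last cs (List.length_eq_zero_iff.mp hd), solutionPass_fst, sset]
    · simp only [hd, dif_neg, not_false_eq_true]
      have hlt := solutionPass_snd_length_lt cs hd
      rw [ih (solutionPass cs).2 (by omega) _]
      rw [bspec_step cs (by intro hn; rw [hn] at hd; exact hd rfl)]
      rw [solutionPass_fst, ← sset, List.append_assoc]

lemma inner_fold (order : List Char) (g : Char → Int) (level : Int) (acc : List Char) :
    order.foldl (fun acc2 ch => if level ≤ g ch then acc2 ++ [ch] else acc2) acc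
      = acc ++ order.filter (fun c => decide (level ≤ g c)) := by
  have := PySem.List.foldl_append_if (fun c => decide (level ≤ g c)) id order acc
  simpa using this

lemma outer_fold (r : List Int) (order : List Char) (g : Char → Int) : ∀ acc : List Char,
    r.foldl (fun acc level =>
        order.foldl (fun acc2 ch => if level ≤ g ch then acc2 ++ [ch] else acc2) acc) acc
      = acc ++ r.flatMap (fun level => order.filter (fun c => decide (level ≤ g c))) := by
  induction r with
  | nil => intro acc; simp
  | cons x t ih =>
    intro acc
    rw [List.foldl_cons, inner_fold, ih, List.flatMap_cons, List.append_assoc]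

lemma alt_eq (source : String) : solution_alt source = String.ofList (bspec source.toList) := by
  rw [solution_alt]
  simp only [PySem.Dict.foldl_insert_getD_add_one_eq_counter, PySem.Dict.keys_counter,
    PySem.Dict.getD_counter, PySem.Dict.values, PySem.Dict.items_counter, List.map_map]
  rw [outer_fold]
  simp only [List.nil_append, bspec, sset, mcount, Function.comp_def]

-- ===== VERDICT (by name: the statement is the Claim_ definition above) =====
theorem solution_spec : Claim_equal_solution := by
  intro source _
  unfold Spec_solution
  rw [alt_eq, solution, loop_eq source.toList.length source.toList le_rfl []]
  rfl
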